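-- pv_equiv track=rewrite | github.com/nickzn/kidsmath | kidsmath.py | gen_formula
-- ===== SOURCE A (Python) =====
-- def gen_formula(numbers, operators):
--     if len(operators) == 1:
--         operator = ' %s ' % operators[0]
--         return operator.join([str(i) for i in numbers])
--     formula = ''
--     max_n = len(operators) - 1
--     n = max_n
--     while n >= 0:
--         parenthesis_1 = ''
--         parenthesis_2 = ''
--         prev_operator = safe_list_get(operators, n - 1)
--         if (prev_operator in ('-', '/') or
--             (prev_operator in ('*', '/') and
--              operators[n] in ('+', '-'))):
--             parenthesis_1 = '('
--             parenthesis_2 = ')'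
--         if n == max_n:
--             num_2nd = numbers[n + 1]
--         elif n == 0:
--             num_2nd = formula
--             parenthesis_1 = ''
--             parenthesis_2 = ''
--         else:
--             num_2nd = formula
--         formula = '%s%s %s %s%s' % (
--             parenthesis_1, numbers[n], operators[n], num_2nd, parenthesis_2
--         )
--         n -= 1
--     return formula
--
-- def safe_list_get(l, idx, default=None):
--     try:
--         return l[idx]
--     except IndexError:
--         return default
--     return default
-- ===== SOURCE B (Python) =====
-- def gen_formula(numbers, operators):
--     if len(operators) == 1:
--         return (' %s ' % operators[0]).join([str(i) for i in numbers])
--     if not operators: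
--         return ''
--     last = len(operators) - 1
--
--     def needs_parens(m):
--         return (operators[m - 1] in ('-', '/') or
--                 (operators[m - 1] in ('*', '/') and operators[m] in ('+', '-')))
--
--     def build(n):
--         if n == last:
--             rest = str(numbers[n + 1])
--         else:
--             child = build(n + 1)
--             rest = '(%s)' % child if needs_parens(n + 1) else child
--         return '%s %s %s' % (numbers[n], operators[n], rest)
--
--     return build(0)
-- ===== Notes on version B (the rewrite author's own statement) =====
-- stated objective: simpler
-- what changed: Replaces A's backwards while-loop that threads an accumulator string and clears/sets parenthesis variables per iteration with a top-down recursive builder build(n) in which the parent decides whether to parenthesise its child via a needs_parens predicate.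
-- outside the precondition, e.g. on gen_formula([1, 2], ['+', '-']): A raises IndexError, B raises IndexError
import Mathlib
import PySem

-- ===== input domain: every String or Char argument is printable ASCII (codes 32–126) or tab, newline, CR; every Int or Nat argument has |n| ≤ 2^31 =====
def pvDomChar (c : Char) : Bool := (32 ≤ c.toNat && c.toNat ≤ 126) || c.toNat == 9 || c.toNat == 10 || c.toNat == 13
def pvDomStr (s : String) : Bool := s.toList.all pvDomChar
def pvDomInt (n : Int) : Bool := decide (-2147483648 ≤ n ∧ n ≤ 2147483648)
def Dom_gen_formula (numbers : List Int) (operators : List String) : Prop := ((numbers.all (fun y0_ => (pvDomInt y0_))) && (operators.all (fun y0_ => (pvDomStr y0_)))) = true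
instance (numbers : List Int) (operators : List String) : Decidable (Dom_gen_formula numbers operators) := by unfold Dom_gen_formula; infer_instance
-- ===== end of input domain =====

-- B replaces A's accumulator-threading backwards loop with a top-down recursive
-- expression builder where the parent decides child parenthesisation (objective: simpler).

-- ===== PORT A =====
-- safe_list_get: Python l[idx] with IndexError caught -> None (default None kept as Option).
def safe_list_get (l : List String) (idx : Int) : Option String :=
  PySem.List.pyGet? l idx

-- A's while-loop, n counting down from max_n; fuel = n+1 at every entry (initial fuel
-- operators.length with n = max_n, both drop by 1 per iteration, loop stops at n < 0).
-- numbers[n], numbers[n+1], operators[n] are in range wherever Python A returns (Pre_);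
-- .getD is only the totalisation of the port.
def genLoopA (numbers : List Int) (operators : List String) (max_n : Int) :
    Nat → Int → String → String
  | 0, _, formula => formula
  | fuel + 1, n, formula =>
    if n < 0 then formula
    else
      let prev_operator := safe_list_get operators (n - 1)
      let opn := (PySem.List.pyGet? operators n).getD ""
      let paren : Bool :=
        (prev_operator == some "-" || prev_operator == some "/") ||
        ((prev_operator == some "*" || prev_operator == some "/") &&
         (opn == "+" || opn == "-"))
      let numn := PySem.Int.toStr ((PySem.List.pyGet? numbers n).getD 0)
      let formula' :=
        if n = max_n then
          let num_2nd := PySem.Int.toStr ((PySem.List.pyGet? numbers (n + 1)).getD 0)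
          (if paren then "(" else "") ++ numn ++ " " ++ opn ++ " " ++ num_2nd ++
            (if paren then ")" else "")
        else if n = 0 then
          numn ++ " " ++ opn ++ " " ++ formula
        else
          (if paren then "(" else "") ++ numn ++ " " ++ opn ++ " " ++ formula ++
            (if paren then ")" else "")
      genLoopA numbers operators max_n fuel (n - 1) formula'

def gen_formula (numbers : List Int) (operators : List String) : String :=
  if operators.length = 1 then
    PySem.Str.join (" " ++ (PySem.List.pyGet? operators 0).getD "" ++ " ")
      (numbers.map PySem.Int.toStr)
  else
    genLoopA numbers operators ((operators.length : Int) - 1)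
      operators.length ((operators.length : Int) - 1) ""

-- ===== PORT B =====
-- needs_parens(m): operators[m-1], operators[m] are in range at every call site (1 ≤ m ≤ last).
def needsParensB (operators : List String) (m : Nat) : Bool :=
  let pm := (PySem.List.pyGet? operators ((m : Int) - 1)).getD ""
  let om := (PySem.List.pyGet? operators (m : Int)).getD ""
  (pm == "-" || pm == "/") || ((pm == "*" || pm == "/") && (om == "+" || om == "-"))

-- build(n), recursing towards last; rem = last - n is the structural argument
-- (rem = 0 ↔ n = last), so build(0) is buildB … 0 last.
def buildB (numbers : List Int) (operators : List String) : Nat → Nat → String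
  | n, rem =>
    let rest :=
      match rem with
      | 0 => PySem.Int.toStr ((PySem.List.pyGet? numbers ((n : Int) + 1)).getD 0)
      | r + 1 =>
        let child := buildB numbers operators (n + 1) r
        if needsParensB operators (n + 1) then "(" ++ child ++ ")" else child
    PySem.Int.toStr ((PySem.List.pyGet? numbers (n : Int)).getD 0) ++ " " ++
      (PySem.List.pyGet? operators (n : Int)).getD "" ++ " " ++ rest

def gen_formula_alt (numbers : List Int) (operators : List String) : String :=
  if operators.length = 1 then
    PySem.Str.join (" " ++ (PySem.List.pyGet? operators 0).getD "" ++ " ")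
      (numbers.map PySem.Int.toStr)
  else if operators.isEmpty then ""
  else buildB numbers operators 0 (operators.length - 1)

-- ===== PRECONDITION & SPEC =====
-- Pre_ excludes exactly the inputs where Python A raises IndexError (two or more
-- operators but fewer than len(operators)+1 numbers); B raises there too.
def Pre_gen_formula (numbers : List Int) (operators : List String) : Prop :=
  operators.length ≤ 1 ∨ operators.length + 1 ≤ numbers.length
instance (numbers : List Int) (operators : List String) : Decidable (Pre_gen_formula numbers operators) := by unfold Pre_gen_formula; infer_instance

def pvWitness_gen_formula : List Int × List String := ([3, 4, 5], ["+", "*"])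

def Spec_gen_formula (numbers : List Int) (operators : List String) (out : String) : Prop := out = gen_formula_alt numbers operators
instance (numbers : List Int) (operators : List String) (out : String) : Decidable (Spec_gen_formula numbers operators out) := by unfold Spec_gen_formula; infer_instance

-- ===== CLAIM (what is proved, stated in full; the proofs are below) =====
def Claim_equal_gen_formula : Prop := ∀ (numbers : List Int) (operators : List String), Dom_gen_formula numbers operators → Pre_gen_formula numbers operators → Spec_gen_formula numbers operators (gen_formula numbers operators)

-- ===== LEMMAS AND PROOFS =====

-- the formula A's loop holds after completing iteration n (for 1 ≤ n ≤ last):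
-- build(n) wrapped iff needs_parens(n)
def wrapW (numbers : List Int) (operators : List String) (last n : Nat) : String :=
  if needsParensB operators n then "(" ++ buildB numbers operators n (last - n) ++ ")"
  else buildB numbers operators n (last - n)

theorem pyGet?_in_range (ops : List String) (m : Nat) (h : m < ops.length) :
    PySem.List.pyGet? ops (m : Int) = some ((PySem.List.pyGet? ops (m : Int)).getD "") := by
  simp [PySem.List.pyGet?_natCast, List.getElem?_eq_getElem h]

theorem loopA_inv (numbers : List Int) (operators : List String) (last : Nat)
    (hlast : 1 ≤ last) (hlen : operators.length = last + 1) :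
    ∀ n : Nat, n < last →
      genLoopA numbers operators (last : Int) (n + 1) (n : Int)
        (wrapW numbers operators last (n + 1)) =
      buildB numbers operators 0 last := by
  intro n
  induction n with
  | zero =>
    intro _
    have h0 : ¬ ((0 : Int) = (last : Int)) := by omega
    have hrem : last = (last - 1) + 1 := by omega
    conv_rhs => rw [hrem, buildB.eq_def]
    simp only [genLoopA]
    rw [if_neg (show ¬ ((((0:Nat)):Int) < 0) by omega),
        if_neg (show ¬ ((((0:Nat)):Int) = (last:Int)) by omega),
        if_pos (show (((0:Nat)):Int) = 0 by simp)]
    simp [wrapW]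
  | succ n ih =>
    intro hn
    have hne : ¬ (((n : Int) + 1) = (last : Int)) := by omega
    have hnz : ¬ (((n : Int) + 1) = 0) := by omega
    have hprev' : safe_list_get operators (n : Int) =
        some ((PySem.List.pyGet? operators (n : Int)).getD "") := by
      rw [safe_list_get]; exact pyGet?_in_range operators n (by omega)
    have step : genLoopA numbers operators (last : Int) (n + 1 + 1) (((n + 1 : Nat)) : Int)
        (wrapW numbers operators last (n + 1 + 1)) =
        genLoopA numbers operators (last : Int) (n + 1) ((n : Int))
        (wrapW numbers operators last (n + 1)) := by
      rw [genLoopA]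
      push_cast
      rw [if_neg (by omega : ¬ ((n : Int) + 1 < 0)), if_neg hne, if_neg hnz]
      have harg : (n : Int) + 1 - 1 = (n : Int) := by omega
      rw [harg]
      congr 1
      · conv_rhs =>
          rw [wrapW, (by omega : last - (n + 1) = (last - (n + 2)) + 1), buildB.eq_def]
        simp [needsParensB, hprev', wrapW, String.append_assoc]
        split_ifs <;> simp_all [String.append_assoc]
    rw [step]
    exact ih (by omega)

theorem loopA_eq_buildB (numbers : List Int) (operators : List String) (last : Nat)
    (hlast : 1 ≤ last) (hlen : operators.length = last + 1) :
    genLoopA numbers operators (last : Int) (last + 1) (last : Int) "" =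
    buildB numbers operators 0 last := by
  have hprev : safe_list_get operators ((last : Int) - 1) =
      some ((PySem.List.pyGet? operators ((last : Int) - 1)).getD "") := by
    have h : ((last : Int) - 1) = (((last - 1 : Nat)) : Int) := by omega
    rw [h, safe_list_get]
    exact pyGet?_in_range operators (last - 1) (by omega)
  have step : genLoopA numbers operators (last : Int) (last + 1) (last : Int) "" =
      genLoopA numbers operators (last : Int) last ((last : Int) - 1)
        (wrapW numbers operators last last) := by
    rw [genLoopA]
    rw [if_neg (by omega : ¬ ((last : Int) < 0))]
    simp only [if_true]
    congr 1
    conv_rhs => rw [wrapW, (by omega : last - last = 0), buildB.eq_def]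
    simp [needsParensB, hprev, String.append_assoc]
    split_ifs <;> simp_all
  rw [step]
  have hm1 : ((last : Int) - 1) = (((last - 1 : Nat)) : Int) := by omega
  rw [hm1]
  have := loopA_inv numbers operators last hlast hlen (last - 1) (by omega)
  have hf : last - 1 + 1 = last := by omega
  rw [hf] at this
  exact this

-- ===== VERDICT (by name: the statement is the Claim_ definition above) =====
theorem gen_formula_spec : Claim_equal_gen_formula := by
  intro numbers operators _ _
  unfold Spec_gen_formula gen_formula gen_formula_alt
  by_cases h1 : operators.length = 1
  · simp [h1]
  · simp only [h1, if_false]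
    by_cases h0 : operators.isEmpty
    · have : operators.length = 0 := by simpa [List.isEmpty_iff_length_eq_zero] using h0
      simp [h0, genLoopA, this]
    · have hlen0 : operators.length ≠ 0 := by
        simpa [List.isEmpty_iff_length_eq_zero] using h0
      simp only [h0]
      have hlast : 1 ≤ operators.length - 1 := by omega
      have hlen : operators.length = (operators.length - 1) + 1 := by omega
      have hc : ((operators.length : Int) - 1) = ((operators.length - 1 : Nat) : Int) := by omega
      rw [hc]
      have := loopA_eq_buildB numbers operators (operators.length - 1) hlast (by omega)
      rw [← this]
      congr 1
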